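-- pv_equiv track=rewrite | github.com/gooddata/gooddata-legacy2cloud | src/gooddata_legacy2cloud/metrics/display_form_utils.py | get_primary_display_form
-- ===== SOURCE A (Python) =====
-- from typing import Any
--
-- def get_primary_display_form(
--     display_forms: list[dict[str, Any]],
-- ) -> dict[str, Any] | None:
--     """
--     Get the primary display form from a list of display forms.
--
--     The primary display form is determined by finding the one with the
--     shortest identifier (fewest dots). This follows Legacy's convention
--     where simpler identifiers represent primary display forms.
--
--     Args:
--         display_forms: List of display form objects from an attribute
--
--     Returns:
--         The primary display form object, or None if the list is empty
--
--     Example: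
--         >>> display_forms = [
--         ...     {"meta": {"identifier": "attr.name.default"}},
--         ...     {"meta": {"identifier": "attr.name"}}
--         ... ]
--         >>> primary = get_primary_display_form(display_forms)
--         >>> primary["meta"]["identifier"]
--         'attr.name'
--     """
--     if not display_forms:
--         return None
--
--     primary_display_form = None
--     for display_form in display_forms:
--         current_length = display_form["meta"]["identifier"].count(".")
--         if not primary_display_form:
--             primary_display_form = display_form
--             continue
--
--         primary_length = primary_display_form["meta"]["identifier"].count(".")
--         if current_length < primary_length:
--             primary_display_form = display_form
--
--     return primary_display_form
-- ===== SOURCE B (Python) =====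
-- def get_primary_display_form(display_forms):
--     """Sort-then-take-front: stable sort by dot count, first element is the
--     first display form with the fewest dots (matches A's strict-< tie-breaking)."""
--     if not display_forms:
--         return None
--     return sorted(display_forms, key=lambda df: df["meta"]["identifier"].count("."))[0]
-- ===== Notes on version B (the rewrite author's own statement) =====
-- stated objective: idiomatic
-- what changed: Replaces A's hand-written running-minimum loop (with a None seed and truthiness re-check) by a guard plus sorted(display_forms, key=dot count)[0]; stability of Python's sort reproduces A's first-minimum tie-breaking.
import Mathlib
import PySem

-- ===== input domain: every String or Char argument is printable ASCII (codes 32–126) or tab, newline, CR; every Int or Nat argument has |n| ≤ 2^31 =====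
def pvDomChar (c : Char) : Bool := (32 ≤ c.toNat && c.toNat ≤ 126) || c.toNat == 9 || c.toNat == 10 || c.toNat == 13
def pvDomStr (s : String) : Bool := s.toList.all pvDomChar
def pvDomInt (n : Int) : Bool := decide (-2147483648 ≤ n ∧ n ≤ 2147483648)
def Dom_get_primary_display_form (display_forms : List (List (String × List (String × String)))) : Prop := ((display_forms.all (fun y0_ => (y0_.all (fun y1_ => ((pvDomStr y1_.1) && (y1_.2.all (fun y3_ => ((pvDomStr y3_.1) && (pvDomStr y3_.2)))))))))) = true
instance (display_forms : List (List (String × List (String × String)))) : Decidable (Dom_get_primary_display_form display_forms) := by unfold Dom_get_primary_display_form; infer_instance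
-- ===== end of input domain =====

-- B replaces A's hand-written running-minimum loop by the idiomatic sorted(..., key=dot count)[0];
-- equivalence (including tie-breaking, via sort stability) is proved on inputs where no lookup raises.

-- df["meta"]["identifier"].count(".") — the key expression both Pythons share.
-- Pre_ guarantees both lookups succeed, so getD's defaults are never used inside Pre_.
def pvDots (df : List (String × List (String × String))) : Nat :=
  PySem.Str.count (PySem.Dict.getD (PySem.Dict.mk (PySem.Dict.getD (PySem.Dict.mk df) "meta" [])) "identifier" "") "."

-- ===== PORT A =====
-- A's loop: primary starts as None; each step computes the dot count, re-seeds when the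
-- accumulator is falsy (None or the empty dict), else keeps the strict minimum seen first.
def get_primary_display_form (display_forms : List (List (String × List (String × String)))) : Option (List (String × List (String × String))) :=
  if display_forms = [] then none
  else
    display_forms.foldl
      (fun primary df =>
        let currentLength := pvDots df
        match primary with
        | none => some df
        | some p =>
          if p = [] then some df
          else if currentLength < pvDots p then some df else some p)
      none

-- ===== PORT B =====
def get_primary_display_form_alt (display_forms : List (List (String × List (String × String)))) : Option (List (String × List (String × String))) :=
  if display_forms = [] then none
  else (PySem.List.sorted display_forms (fun df => pvDots df)).head?

-- ===== PRECONDITION & SPEC =====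
-- Pre_ excludes exactly the inputs where Python raises KeyError: some entry lacks "meta"
-- or its "meta" dict lacks "identifier".
def Pre_get_primary_display_form (display_forms : List (List (String × List (String × String)))) : Prop :=
  (display_forms.all (fun df =>
    ((PySem.Dict.get? (PySem.Dict.mk df) "meta").elim false
      (fun m => (PySem.Dict.get? (PySem.Dict.mk m) "identifier").isSome)))) = true
instance (display_forms : List (List (String × List (String × String)))) : Decidable (Pre_get_primary_display_form display_forms) := by unfold Pre_get_primary_display_form; infer_instance

def pvWitness_get_primary_display_form : (List (List (String × List (String × String)))) :=
  [[("meta", [("identifier", "attr.name.default")])], [("meta", [("identifier", "attr.name")])]]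

def Spec_get_primary_display_form (display_forms : List (List (String × List (String × String)))) (out : Option (List (String × List (String × String)))) : Prop := out = get_primary_display_form_alt display_forms
instance (display_forms : List (List (String × List (String × String)))) (out : Option (List (String × List (String × String)))) : Decidable (Spec_get_primary_display_form display_forms out) := by unfold Spec_get_primary_display_form; infer_instance

-- ===== CLAIM (what is proved, stated in full; the proofs are below) =====
def Claim_equal_get_primary_display_form : Prop := ∀ (display_forms : List (List (String × List (String × String)))), Dom_get_primary_display_form display_forms → Pre_get_primary_display_form display_forms → Spec_get_primary_display_form display_forms (get_primary_display_form display_forms)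

-- ===== LEMMAS AND PROOFS =====

-- Head of the stable insertion sort, tracked through the foldl: inserting x in front of a
-- nonempty accumulator changes the head exactly like one strict-minimum step.
theorem head_foldl_insertBy {α κ : Type} [LinearOrder κ] (key : α → κ) :
    ∀ (xs : List α) (h : α) (t : List α),
      (xs.foldl (fun acc x => PySem.List.insertBy (fun a b => decide (key a < key b)) x acc) (h :: t)).head?
        = some (xs.foldl (fun m x => if key x < key m then x else m) h) := by
  intro xs
  induction xs with
  | nil => intro h t; rfl
  | cons x xs ih =>
    intro h t
    simp only [List.foldl_cons, PySem.List.insertBy]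
    by_cases hx : key x < key h
    · simp [hx, ih]
    · simp [hx, ih]

-- A's fold, with the truthiness branch dead because every element is a non-empty dict.
theorem foldA_eq_min_fold :
    ∀ (xs : List (List (String × List (String × String)))) (m : List (String × List (String × String))),
      m ≠ [] → (∀ df ∈ xs, df ≠ []) →
      (xs.foldl
        (fun primary df =>
          let currentLength := pvDots df
          match primary with
          | none => some df
          | some p =>
            if p = [] then some df
            else if currentLength < pvDots p then some df else some p)
        (some m))
      = some (xs.foldl (fun p df => if pvDots df < pvDots p then df else p) m) := by
  intro xs
  induction xs with
  | nil => intro m _ _; rfl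
  | cons x xs ih =>
    intro m hm hall
    simp only [List.foldl_cons, hm]
    have hx : x ≠ [] := hall x (List.mem_cons_self ..)
    by_cases hlt : pvDots x < pvDots m
    · simp only [hlt]
      exact ih x hx (fun df hdf => hall df (List.mem_cons_of_mem _ hdf))
    · simp only [hlt]
      exact ih m hm (fun df hdf => hall df (List.mem_cons_of_mem _ hdf))

-- Pre_ implies every entry is a non-empty dict (it has a "meta" key).
theorem pre_nonempty {display_forms : List (List (String × List (String × String)))}
    (hpre : Pre_get_primary_display_form display_forms) :
    ∀ df ∈ display_forms, df ≠ [] := by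
  intro df hdf hnil
  unfold Pre_get_primary_display_form at hpre
  rw [List.all_eq_true] at hpre
  have := hpre df hdf
  subst hnil
  simp [PySem.Dict.get?] at this

-- ===== VERDICT (by name: the statement is the Claim_ definition above) =====
theorem get_primary_display_form_spec : Claim_equal_get_primary_display_form := by
  intro dfs _hdom hpre
  unfold Spec_get_primary_display_form get_primary_display_form get_primary_display_form_alt
  cases dfs with
  | nil => rfl
  | cons d t =>
    have hne : (d :: t : List (List (String × List (String × String)))) ≠ [] := by simp
    simp only [if_neg hne]
    have hall := pre_nonempty hpre
    have hd : d ≠ [] := hall d (List.mem_cons_self ..)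
    rw [List.foldl_cons]
    have h1 :
        (PySem.List.sorted (d :: t) (fun df => pvDots df)).head?
          = some (t.foldl (fun p df => if pvDots df < pvDots p then df else p) d) := by
      rw [PySem.List.sorted_eq_foldl_insertBy]
      rw [List.foldl_cons]
      exact head_foldl_insertBy (fun df => pvDots df) t d []
    rw [h1]
    exact foldA_eq_min_fold t d hd (fun df hdf => hall df (List.mem_cons_of_mem _ hdf))
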